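-- pv_equiv track=rewrite | github.com/DGSH9/10x-Academy | 4 Oct/201021/1 TEST__DONE/1 Harry and Horcurx__DONE/11%.py | hrho
-- ===== SOURCE A (Python) =====
-- def hrho(n,arr1):
--     d = 0
--     res = 0
--     p = [0]*(n+1)
--     ne = [0]*(n+1)
--     p[0]=1
--
--     for i in range(n):
--         if arr1[i] == 1:
--             d+=1
--         else:
--             d-=1
--         if(d<0):
--             res+=ne[-d]
--             ne[-d] = ne[-d]+1
--         else:
--             res+=p[d]
--             p[d] = p[d]+1
--
--     return res
-- ===== SOURCE B (Python) =====
-- def hrho(n, arr1):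
--     # Build the full prefix-balance table in one pass, then tally each
--     # balance value and combine with c*(c-1)//2 pairs per value.
--     bal = [0]
--     for i in range(n):
--         bal.append(bal[-1] + (1 if arr1[i] == 1 else -1))
--     counts = {}
--     for b in bal:
--         counts[b] = counts.get(b, 0) + 1
--     return sum(c * (c - 1) // 2 for c in counts.values())
-- ===== Notes on version B (the rewrite author's own statement) =====
-- stated objective: alternative
-- what changed: Replaces A's incremental add-then-increment counting over two sign-split count arrays by a build-table-then-combine decomposition: compute the full prefix-balance list, tally it with a dict, and return sum(c*(c-1)//2) over the tallies.
import Mathlib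
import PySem

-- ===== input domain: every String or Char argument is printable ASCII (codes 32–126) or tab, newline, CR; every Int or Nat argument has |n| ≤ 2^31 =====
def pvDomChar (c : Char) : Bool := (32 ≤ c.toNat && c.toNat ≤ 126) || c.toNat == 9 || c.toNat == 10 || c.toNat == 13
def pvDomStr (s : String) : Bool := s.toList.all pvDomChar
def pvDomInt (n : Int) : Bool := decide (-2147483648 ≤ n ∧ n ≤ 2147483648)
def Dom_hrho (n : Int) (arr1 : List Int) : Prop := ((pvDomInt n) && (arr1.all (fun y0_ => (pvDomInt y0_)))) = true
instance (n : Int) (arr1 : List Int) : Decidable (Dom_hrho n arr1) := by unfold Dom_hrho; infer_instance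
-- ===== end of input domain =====

-- B builds the prefix-balance table, tallies it with a dict and sums c*(c-1)//2 per value,
-- instead of A's incremental counting over two sign-split arrays (alternative decomposition, same cost).

-- ===== PORT A =====
def hrho (n : Int) (arr1 : List Int) : Int :=
  -- d = 0; res = 0; p = [0]*(n+1); ne = [0]*(n+1); p[0] = 1
  let p : List Int := PySem.List.pySetD (List.replicate (n + 1).toNat 0) 0 1
  let ne : List Int := List.replicate (n + 1).toNat 0
  -- for i in range(n): …
  let st := (PySem.List.pyRange 0 n 1).foldl
    (fun (st : Int × Int × List Int × List Int) i =>
      let d := if PySem.List.pyGetD arr1 i 0 == 1 then st.1 + 1 else st.1 - 1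
      if d < 0 then
        (d, st.2.1 + PySem.List.pyGetD st.2.2.2 (-d) 0, st.2.2.1,
         PySem.List.pySetD st.2.2.2 (-d) (PySem.List.pyGetD st.2.2.2 (-d) 0 + 1))
      else
        (d, st.2.1 + PySem.List.pyGetD st.2.2.1 d 0,
         PySem.List.pySetD st.2.2.1 d (PySem.List.pyGetD st.2.2.1 d 0 + 1), st.2.2.2))
    (0, 0, p, ne)
  st.2.1

-- ===== PORT B =====
def hrho_alt (n : Int) (arr1 : List Int) : Int :=
  -- bal = [0]; for i in range(n): bal.append(bal[-1] + (1 if arr1[i] == 1 else -1))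
  let bal : List Int := (PySem.List.pyRange 0 n 1).foldl
    (fun b i => b ++ [PySem.List.pyGetD b (-1) 0 + (if PySem.List.pyGetD arr1 i 0 == 1 then 1 else -1)])
    [0]
  -- counts = {}; for b in bal: counts[b] = counts.get(b, 0) + 1
  let counts : PySem.Dict Int Int := bal.foldl (fun d b => d.modify b 0 (· + 1)) PySem.Dict.empty
  -- return sum(c * (c - 1) // 2 for c in counts.values())
  counts.values.foldl (fun acc c => acc + PySem.Int.floordiv (c * (c - 1)) 2) 0

-- ===== PRECONDITION & SPEC =====
-- Pre_ excludes exactly the inputs where A raises IndexError: n < 0 (p = [0]*(n+1) is empty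
-- when p[0] = 1 is assigned) and n > len(arr1) (arr1[i] out of range inside the loop).
def Pre_hrho (n : Int) (arr1 : List Int) : Prop := 0 ≤ n ∧ n ≤ (arr1.length : Int)
instance (n : Int) (arr1 : List Int) : Decidable (Pre_hrho n arr1) := by unfold Pre_hrho; infer_instance
def pvWitness_hrho : Int × List Int := (4, [1, 0, 1, 1])

def Spec_hrho (n : Int) (arr1 : List Int) (out : Int) : Prop := out = hrho_alt n arr1
instance (n : Int) (arr1 : List Int) (out : Int) : Decidable (Spec_hrho n arr1 out) := by unfold Spec_hrho; infer_instance

-- ===== CLAIM (what is proved, stated in full; the proofs are below) =====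
def Claim_equal_hrho : Prop := ∀ (n : Int) (arr1 : List Int), Dom_hrho n arr1 → Pre_hrho n arr1 → Spec_hrho n arr1 (hrho n arr1)

-- ===== LEMMAS AND PROOFS =====

-- element-level step of A's loop body (the loop body is stepA applied to arr1[i])
def stepA (st : Int × Int × List Int × List Int) (x : Int) : Int × Int × List Int × List Int :=
  let d := if x == 1 then st.1 + 1 else st.1 - 1
  if d < 0 then
    (d, st.2.1 + PySem.List.pyGetD st.2.2.2 (-d) 0, st.2.2.1,
     PySem.List.pySetD st.2.2.2 (-d) (PySem.List.pyGetD st.2.2.2 (-d) 0 + 1))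
  else
    (d, st.2.1 + PySem.List.pyGetD st.2.2.1 d 0,
     PySem.List.pySetD st.2.2.1 d (PySem.List.pyGetD st.2.2.1 d 0 + 1), st.2.2.2)

-- element-level step of B's balance-table loop
def balStep (b : List Int) (x : Int) : List Int :=
  b ++ [PySem.List.pyGetD b (-1) 0 + (if x == 1 then 1 else -1)]

def balF (t : List Int) : List Int := t.foldl balStep [0]

-- running pair count: pairsP xs = number of index pairs i < j with xs[i] = xs[j]
def pairsAux (seen : List Int) (res : Int) : List Int → Int
  | [] => res
  | x :: rest => pairsAux (seen ++ [x]) (res + seen.count x) rest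

def pairsP (xs : List Int) : Int := pairsAux [] 0 xs

def comb2 (c : Int) : Int := PySem.Int.floordiv (c * (c - 1)) 2

def sumC2 (xs : List Int) : Int := ((PySem.Set.ofList xs).map (fun k => comb2 (xs.count k : Int))).sum

lemma pyRange_foldl_take {β : Type} (arr1 : List Int) (n : Int) (h0 : 0 ≤ n)
    (h1 : n ≤ (arr1.length : Int)) (f : β → Int → β) (init : β) :
    (PySem.List.pyRange 0 n 1).foldl (fun acc i => f acc (PySem.List.pyGetD arr1 i 0)) init
      = (arr1.take n.toNat).foldl f init := by
  have hlen : ((arr1.take n.toNat).length : Int) = n := by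
    simp [List.length_take]; omega
  have hcongr : (PySem.List.pyRange 0 n 1).foldl (fun acc i => f acc (PySem.List.pyGetD arr1 i 0)) init
      = (PySem.List.pyRange 0 n 1).foldl (fun acc i => f acc (PySem.List.pyGetD (arr1.take n.toNat) i 0)) init := by
    refine PySem.List.foldl_congr_mem _ _ _ _ ?_
    intro acc i hi
    rw [PySem.List.mem_pyRange_one] at hi
    have h3 : i < (arr1.length : Int) := lt_of_lt_of_le hi.2 h1
    have h2 : i < ((arr1.take n.toNat).length : Int) := by rw [hlen]; exact hi.2
    rw [PySem.List.pyGetD_eq_getElem _ _ hi.1 h3, PySem.List.pyGetD_eq_getElem _ _ hi.1 h2]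
    simp [List.getElem_take]
  have h2 := PySem.List.foldl_pyRange_zero_pyGetD' (arr1.take n.toNat) 0 f init
  rw [hlen] at h2
  exact hcongr.trans h2

lemma balF_append (t : List Int) (x : Int) :
    balF (t ++ [x]) = balF t ++ [PySem.List.pyGetD (balF t) (-1) 0 + (if x == 1 then 1 else -1)] := by
  simp [balF, List.foldl_append, balStep]

lemma balF_last_abs (t : List Int) :
    |PySem.List.pyGetD (balF t) (-1) 0| ≤ (t.length : Int) := by
  induction t using List.reverseRecOn with
  | nil => decide
  | append_singleton t x ih =>
    rw [balF_append, PySem.List.pyGetD_neg_one_append_singleton]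
    rw [abs_le] at ih
    simp only [List.length_append, List.length_cons, List.length_nil]
    split <;> rw [abs_le] <;> push_cast <;> omega

lemma pairsAux_append (l : List Int) : ∀ (seen : List Int) (res : Int) (v : Int),
    pairsAux seen res (l ++ [v]) = pairsAux seen res l + ((seen ++ l).count v : Int) := by
  induction l with
  | nil => intro seen res v; simp [pairsAux]
  | cons x l ih =>
    intro seen res v
    simp only [List.cons_append, pairsAux]
    rw [ih]
    simp

lemma pairsP_append (xs : List Int) (v : Int) :
    pairsP (xs ++ [v]) = pairsP xs + (xs.count v : Int) := by
  simpa [pairsP] using pairsAux_append xs [] 0 v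

lemma comb2_succ (c : Int) : comb2 (c + 1) = comb2 c + c := by
  have hev : Even ((c - 1) * c) := by
    have h := Int.even_mul_succ_self (c - 1)
    rwa [show c - 1 + 1 = c by ring] at h
  obtain ⟨t, ht⟩ := hev
  have h1 : c * (c - 1) = 2 * t := by linarith
  have h2 : (c + 1) * (c + 1 - 1) = 2 * (t + c) := by linarith
  simp only [comb2, h1, h2, PySem.Int.floordiv_eq_ediv_of_pos (by norm_num : (0:Int) < 2)]
  rw [Int.mul_ediv_cancel_left _ (by norm_num), Int.mul_ediv_cancel_left _ (by norm_num)]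

lemma sumC2_eq_finset (xs : List Int) :
    sumC2 xs = ∑ k ∈ xs.toFinset, comb2 (xs.count k : Int) := by
  have hmem : (PySem.Set.ofList xs).toFinset = xs.toFinset := by
    ext k; simp [List.mem_toFinset, PySem.Set.mem_ofList]
  rw [sumC2, ← List.sum_toFinset _ (PySem.Set.nodup_ofList xs), hmem]

lemma sumC2_append (xs : List Int) (v : Int) :
    sumC2 (xs ++ [v]) = sumC2 xs + (xs.count v : Int) := by
  rw [sumC2_eq_finset, sumC2_eq_finset]
  have hcnt : ∀ k : Int, ((xs ++ [v]).count k : Int)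
      = (xs.count k : Int) + (if k = v then 1 else 0) := by
    intro k
    rw [List.count_append]
    by_cases h : k = v
    · subst h; simp [List.count_singleton]
    · simp [List.count_singleton, h, Ne.symm h]
  have hterm : ∀ k : Int, comb2 ((xs ++ [v]).count k : Int)
      = comb2 (xs.count k : Int) + (if k = v then (xs.count v : Int) else 0) := by
    intro k
    rw [hcnt k]
    by_cases h : k = v
    · subst h; simp [comb2_succ]
    · simp [h]
  by_cases hv : v ∈ xs
  · have hset : (xs ++ [v]).toFinset = xs.toFinset := by
      ext k; simp [List.mem_toFinset]; intro h; subst h; exact hv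
    rw [hset]
    rw [Finset.sum_congr rfl (fun k _ => hterm k), Finset.sum_add_distrib,
        Finset.sum_ite_eq' xs.toFinset v (fun _ => (xs.count v : Int))]
    simp [hv]
  · have hset : (xs ++ [v]).toFinset = insert v xs.toFinset := by
      ext k; simp [List.mem_toFinset, or_comm]
    have hv0 : xs.count v = 0 := List.count_eq_zero.mpr hv
    rw [hset, Finset.sum_insert (by simpa using hv)]
    rw [Finset.sum_congr rfl (fun k _ => hterm k), Finset.sum_add_distrib,
        Finset.sum_ite_eq' xs.toFinset v (fun _ => (xs.count v : Int))]
    have hc0 : comb2 ((xs ++ [v]).count v : Int) = 0 := by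
      rw [hcnt v]; simp [hv0, comb2]
    rw [hc0]
    simp [hv, hv0]

lemma sumC2_eq_pairsP (xs : List Int) : sumC2 xs = pairsP xs := by
  induction xs using List.reverseRecOn with
  | nil => simp [sumC2, pairsP, pairsAux, PySem.Set.ofList]
  | append_singleton xs v ih => rw [sumC2_append, pairsP_append, ih]

-- the invariant carried by A's fold
def InvA (N : Nat) (t : List Int) (st : Int × Int × List Int × List Int) : Prop :=
  st.1 = PySem.List.pyGetD (balF t) (-1) 0 ∧
  st.2.1 = pairsP (balF t) ∧
  st.2.2.1.length = N ∧ st.2.2.2.length = N ∧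
  (∀ k : Nat, k < N → st.2.2.1.getD k 0 = ((balF t).count (k : Int) : Int)) ∧
  (∀ k : Nat, 0 < k → k < N → st.2.2.2.getD k 0 = ((balF t).count (-(k : Int)) : Int))

lemma invA_holds (N : Nat) : ∀ (t : List Int), t.length < N →
    InvA N t (t.foldl stepA (0, 0, PySem.List.pySetD (List.replicate N 0) 0 1, List.replicate N 0)) := by
  intro t
  induction t using List.reverseRecOn with
  | nil =>
    intro hN
    have hset : PySem.List.pySetD (List.replicate N (0:Int)) 0 1 = (List.replicate N (0:Int)).set 0 1 :=
      PySem.List.pySetD_of_nonneg _ _ (by norm_num)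
    have hbal0 : balF [] = [0] := rfl
    refine ⟨?_, ?_, ?_, by simp, ?_, ?_⟩
    · show (0:Int) = PySem.List.pyGetD (balF []) (-1) 0
      decide
    · show (0:Int) = pairsP (balF [])
      decide
    · show (PySem.List.pySetD (List.replicate N (0:Int)) 0 1).length = N
      rw [hset]; simp
    · intro k hk
      show (PySem.List.pySetD (List.replicate N (0:Int)) 0 1).getD k 0 = ((balF []).count (k : Int) : Int)
      rw [hbal0, hset, List.getD_eq_getElem _ _ (by simp [List.length_set]; omega), List.getElem_set]
      by_cases hk0 : k = 0
      · subst hk0; simp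
      · rw [if_neg (by omega)]
        rw [List.getElem_replicate, List.count_eq_zero.mpr (by simp; omega)]
        simp
    · intro k hk0 hkN
      show (List.replicate N (0:Int)).getD k 0 = ((balF []).count (-(k : Int)) : Int)
      rw [hbal0, List.getD_eq_getElem _ _ (by simpa using hkN), List.getElem_replicate,
          List.count_eq_zero.mpr (by simp; omega)]
      simp
  | append_singleton t x ih =>
    intro hN
    have htN : t.length < N := by simp at hN; omega
    rw [List.foldl_append]
    set st := t.foldl stepA (0, 0, PySem.List.pySetD (List.replicate N 0) 0 1, List.replicate N 0) with hst
    obtain ⟨hd, hres, hplen, hnelen, hp, hne⟩ := ih htN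
    have habs := abs_le.mp (balF_last_abs t)
    have hlt : (t.length : Int) + 1 < (N : Int) := by
      simp only [List.length_append, List.length_cons, List.length_nil] at hN
      push_cast; omega
    set dnew : Int := if x == 1 then st.1 + 1 else st.1 - 1 with hdnew
    have hdlo : -((N : Int)) < dnew := by rw [hdnew, hd]; split <;> omega
    have hdhi : dnew < (N : Int) := by rw [hdnew, hd]; split <;> omega
    have hbal : balF (t ++ [x]) = balF t ++ [dnew] := by
      rw [balF_append, hdnew, hd]
      by_cases hx : x == 1 <;> simp [hx, sub_eq_add_neg]
    have hcount : ∀ v : Int, ((balF (t ++ [x])).count v : Int)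
        = ((balF t).count v : Int) + (if v = dnew then 1 else 0) := by
      intro v
      rw [hbal, List.count_append]
      by_cases h : v = dnew
      · subst h; simp [List.count_singleton]
      · simp [List.count_singleton, h, Ne.symm h]
    have hlast : PySem.List.pyGetD (balF (t ++ [x])) (-1) 0 = dnew := by
      rw [hbal, PySem.List.pyGetD_neg_one_append_singleton]
    show InvA N (t ++ [x]) (stepA st x)
    by_cases hneg : dnew < 0
    · -- negative branch: read/write ne at -dnew
      have hstep : stepA st x = (dnew, st.2.1 + PySem.List.pyGetD st.2.2.2 (-dnew) 0, st.2.2.1,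
          PySem.List.pySetD st.2.2.2 (-dnew) (PySem.List.pyGetD st.2.2.2 (-dnew) 0 + 1)) := by
        rw [stepA]; simp only [← hdnew]; rw [if_pos hneg]
      have hidx0 : (0:Int) ≤ -dnew := by omega
      have hidxlt : -dnew < (st.2.2.2.length : Int) := by rw [hnelen]; omega
      have hidxpos : 0 < (-dnew).toNat := by omega
      have hidxN : (-dnew).toNat < N := by omega
      have hcast : -(((-dnew).toNat : Nat) : Int) = dnew := by omega
      have hread : PySem.List.pyGetD st.2.2.2 (-dnew) 0 = (((balF t).count dnew) : Int) := by
        rw [PySem.List.pyGetD_eq_getElem _ _ hidx0 hidxlt, ← List.getD_eq_getElem _ 0,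
            hne (-dnew).toNat hidxpos hidxN, hcast]
      rw [hstep]
      refine ⟨hlast.symm, ?_, hplen, ?_, ?_, ?_⟩
      · show st.2.1 + PySem.List.pyGetD st.2.2.2 (-dnew) 0 = pairsP (balF (t ++ [x]))
        rw [hres, hread, hbal, pairsP_append]
      · show (PySem.List.pySetD st.2.2.2 (-dnew) _).length = N
        rw [PySem.List.pySetD_of_nonneg _ _ hidx0]
        simp [hnelen]
      · intro k hk
        show st.2.2.1.getD k 0 = _
        rw [hp k hk, hcount]
        have hne' : ((k : Int)) ≠ dnew := by omega
        simp [hne']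
      · intro k hk0 hkN
        show (PySem.List.pySetD st.2.2.2 (-dnew) (PySem.List.pyGetD st.2.2.2 (-dnew) 0 + 1)).getD k 0 = _
        rw [PySem.List.pySetD_of_nonneg _ _ hidx0,
            List.getD_eq_getElem _ _ (by simp [List.length_set, hnelen]; omega),
            List.getElem_set]
        by_cases hkd : (-dnew).toNat = k
        · rw [if_pos hkd, hread, hcount]
          have hEq : -((k : Int)) = dnew := by omega
          rw [hEq]
          simp
        · rw [if_neg hkd, ← List.getD_eq_getElem _ 0, hne k hk0 hkN, hcount]
          have hne' : -((k : Int)) ≠ dnew := by omega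
          simp [hne']
    · -- nonnegative branch: read/write p at dnew
      have hstep : stepA st x = (dnew, st.2.1 + PySem.List.pyGetD st.2.2.1 dnew 0,
          PySem.List.pySetD st.2.2.1 dnew (PySem.List.pyGetD st.2.2.1 dnew 0 + 1), st.2.2.2) := by
        rw [stepA]; simp only [← hdnew]; rw [if_neg hneg]
      have hidx0 : (0:Int) ≤ dnew := by omega
      have hidxlt : dnew < (st.2.2.1.length : Int) := by rw [hplen]; omega
      have hidxN : dnew.toNat < N := by omega
      have hcast : ((dnew.toNat : Nat) : Int) = dnew := by omega
      have hread : PySem.List.pyGetD st.2.2.1 dnew 0 = (((balF t).count dnew) : Int) := by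
        rw [PySem.List.pyGetD_eq_getElem _ _ hidx0 hidxlt, ← List.getD_eq_getElem _ 0,
            hp dnew.toNat hidxN, hcast]
      rw [hstep]
      refine ⟨hlast.symm, ?_, ?_, hnelen, ?_, ?_⟩
      · show st.2.1 + PySem.List.pyGetD st.2.2.1 dnew 0 = pairsP (balF (t ++ [x]))
        rw [hres, hread, hbal, pairsP_append]
      · show (PySem.List.pySetD st.2.2.1 dnew _).length = N
        rw [PySem.List.pySetD_of_nonneg _ _ hidx0]
        simp [hplen]
      · intro k hk
        show (PySem.List.pySetD st.2.2.1 dnew (PySem.List.pyGetD st.2.2.1 dnew 0 + 1)).getD k 0 = _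
        rw [PySem.List.pySetD_of_nonneg _ _ hidx0,
            List.getD_eq_getElem _ _ (by simp [List.length_set, hplen]; omega),
            List.getElem_set]
        by_cases hkd : dnew.toNat = k
        · rw [if_pos hkd, hread, hcount]
          have hEq : ((k : Int)) = dnew := by omega
          rw [hEq]
          simp
        · rw [if_neg hkd, ← List.getD_eq_getElem _ 0, hp k hk, hcount]
          have hne' : ((k : Int)) ≠ dnew := by omega
          simp [hne']
      · intro k hk0 hkN
        show st.2.2.2.getD k 0 = _
        rw [hne k hk0 hkN, hcount]
        have hne' : -((k : Int)) ≠ dnew := by omega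
        simp [hne']

lemma hrho_eq_pairsP (n : Int) (arr1 : List Int) (h0 : 0 ≤ n) (h1 : n ≤ (arr1.length : Int)) :
    hrho n arr1 = pairsP (balF (arr1.take n.toNat)) := by
  have hA : hrho n arr1 = ((PySem.List.pyRange 0 n 1).foldl
      (fun acc i => stepA acc (PySem.List.pyGetD arr1 i 0))
      (0, 0, PySem.List.pySetD (List.replicate (n + 1).toNat 0) 0 1,
        List.replicate (n + 1).toNat 0)).2.1 := rfl
  rw [hA, pyRange_foldl_take arr1 n h0 h1 stepA _]
  have hlen : (arr1.take n.toNat).length < (n + 1).toNat := by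
    simp [List.length_take]; omega
  exact (invA_holds (n + 1).toNat (arr1.take n.toNat) hlen).2.1

lemma hrho_alt_eq_sumC2 (n : Int) (arr1 : List Int) (h0 : 0 ≤ n) (h1 : n ≤ (arr1.length : Int)) :
    hrho_alt n arr1 = sumC2 (balF (arr1.take n.toNat)) := by
  have hB : hrho_alt n arr1 = (((PySem.List.pyRange 0 n 1).foldl
      (fun b i => balStep b (PySem.List.pyGetD arr1 i 0)) [0]).foldl
        (fun d b => PySem.Dict.modify d b 0 (· + 1)) PySem.Dict.empty).values.foldl
          (fun acc c => acc + PySem.Int.floordiv (c * (c - 1)) 2) 0 := rfl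
  rw [hB, pyRange_foldl_take arr1 n h0 h1 balStep [0]]
  have hbal : (arr1.take n.toNat).foldl balStep [0] = balF (arr1.take n.toNat) := rfl
  rw [hbal]
  set xs := balF (arr1.take n.toNat) with hxs
  rw [show xs.foldl (fun d b => PySem.Dict.modify d b 0 (· + 1)) PySem.Dict.empty = PySem.Dict.counter xs from
      (PySem.Dict.counter_eq_foldl xs).symm]
  rw [PySem.Dict.values_eq_map_keys _ (PySem.Dict.nodup_keys_counter xs) 0,
      PySem.Dict.keys_counter]
  rw [PySem.List.foldl_add, List.map_map]
  have hfun : ((fun c => PySem.Int.floordiv (c * (c - 1)) 2) ∘ fun k => (PySem.Dict.counter xs).getD k 0)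
      = fun k => comb2 (xs.count k : Int) := by
    funext k
    simp [Function.comp, PySem.Dict.getD_counter, comb2]
  rw [hfun]
  simp [sumC2]

-- ===== VERDICT (by name: the statement is the Claim_ definition above) =====
theorem hrho_spec : Claim_equal_hrho := by
  intro n arr1 _ hpre
  obtain ⟨h0, h1⟩ := hpre
  unfold Spec_hrho
  rw [hrho_eq_pairsP n arr1 h0 h1, hrho_alt_eq_sumC2 n arr1 h0 h1, sumC2_eq_pairsP]
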